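-- pv_equiv track=rewrite | github.com/bokaif/codejam-submissions | 2022/Qualification Round/3D Printing.py | dumb
-- ===== SOURCE A (Python) =====
-- def dumb(c1, c2, c3):
--     n = 10**6
--     c, m, y, k = [min(c1[i], c2[i], c3[i]) for i in range(4)]
--     s = c + m + y + k
--     if s < n:
--         return 'IMPOSSIBLE'
--     elif s == n:
--         return f'{c} {m} {y} {k}'
--     else:
--         s = i = 0
--         l = [c, m, y, k]
--         while s < n:
--             s += l[i]
--             i += 1
--         ll = l[:i] if s == n else l[:i-1] + [n - sum(l[:i - 1])]
--         return ' '.join(map(str, ll)) + (4 - len(ll)) * ' 0'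
-- ===== SOURCE B (Python) =====
-- def _go(vals, need):
--     if not vals:
--         return []
--     v = vals[0]
--     if v < need:
--         return [v] + _go(vals[1:], need - v)
--     return [need] + [0] * (len(vals) - 1)
--
--
-- def dumb(c1, c2, c3):
--     n = 10**6
--     mn = [min(a, b, c) for a, b, c in zip(c1, c2, c3)]
--     s = sum(mn)
--     if s < n:
--         return 'IMPOSSIBLE'
--     if s == n:
--         return ' '.join(map(str, mn))
--     return ' '.join(map(str, _go(mn, n)))
-- ===== Notes on version B (the rewrite author's own statement) =====
-- stated objective: alternative
-- what changed: Replaces A's while-loop index search, list slicing, prefix re-summation and ' 0' string padding with a recursive remaining-need decomposition that, at the clamp point, emits the remaining need and zero-fills the whole tail in one step.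
import Mathlib
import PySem

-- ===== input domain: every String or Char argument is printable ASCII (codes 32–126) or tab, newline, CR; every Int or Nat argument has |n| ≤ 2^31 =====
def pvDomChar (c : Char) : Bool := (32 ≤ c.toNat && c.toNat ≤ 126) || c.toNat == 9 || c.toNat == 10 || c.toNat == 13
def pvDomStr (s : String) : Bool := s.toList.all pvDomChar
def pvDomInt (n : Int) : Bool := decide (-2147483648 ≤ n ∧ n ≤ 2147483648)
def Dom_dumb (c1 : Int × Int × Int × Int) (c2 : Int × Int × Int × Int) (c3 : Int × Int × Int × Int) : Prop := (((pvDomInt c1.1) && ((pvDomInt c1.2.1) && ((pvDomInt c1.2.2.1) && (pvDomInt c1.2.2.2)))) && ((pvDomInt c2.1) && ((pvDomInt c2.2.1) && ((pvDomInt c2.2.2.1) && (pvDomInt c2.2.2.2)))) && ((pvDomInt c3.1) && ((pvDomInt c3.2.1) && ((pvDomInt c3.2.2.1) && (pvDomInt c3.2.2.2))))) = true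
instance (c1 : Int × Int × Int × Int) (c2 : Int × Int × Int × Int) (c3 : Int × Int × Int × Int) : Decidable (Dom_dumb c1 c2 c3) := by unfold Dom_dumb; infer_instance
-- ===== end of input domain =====

-- B replaces A's while-loop index search, slicing, prefix re-summation and ' 0' string padding
-- with a recursive remaining-need decomposition that zero-fills the tail at the clamp point
-- (objective: alternative decomposition; same cost).

-- ===== PORT A =====
-- the 'while s < n: s += l[i]; i += 1' loop: structural recursion on the suffix of l not yet
-- consumed (Python's l[i:]); the [] base case returns (i, s) just as Python's exhausted loop would.
def dumbWhile : List Int → Int → Nat → Nat × Int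
  | [], s, i => (i, s)
  | v :: rest, s, i => if s < 1000000 then dumbWhile rest (s + v) (i + 1) else (i, s)

def dumb (c1 : Int × Int × Int × Int) (c2 : Int × Int × Int × Int) (c3 : Int × Int × Int × Int) : String :=
  let n : Int := 1000000
  let c := min c1.1 (min c2.1 c3.1)
  let m := min c1.2.1 (min c2.2.1 c3.2.1)
  let y := min c1.2.2.1 (min c2.2.2.1 c3.2.2.1)
  let k := min c1.2.2.2 (min c2.2.2.2 c3.2.2.2)
  let s := c + m + y + k
  if s < n then "IMPOSSIBLE"
  else if s = n then
    PySem.Int.toStr c ++ " " ++ PySem.Int.toStr m ++ " " ++ PySem.Int.toStr y ++ " " ++ PySem.Int.toStr k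
  else
    let l := [c, m, y, k]
    let r := dumbWhile l 0 0
    let i := r.1
    let s' := r.2
    let ll := if s' = n then l.take i else l.take (i - 1) ++ [n - (l.take (i - 1)).sum]
    PySem.Str.join " " (ll.map PySem.Int.toStr) ++ String.join (List.replicate (4 - ll.length) " 0")

-- ===== PORT B =====
-- B's helper _go: recursion on the list with the remaining need; at the clamp point it emits
-- the need and a zero tail ([0] * (len(vals) - 1)) at once.
def dumbGo : List Int → Int → List Int
  | [], _ => []
  | v :: rest, need => if v < need then v :: dumbGo rest (need - v) else need :: List.replicate rest.length 0

def dumb_alt (c1 : Int × Int × Int × Int) (c2 : Int × Int × Int × Int) (c3 : Int × Int × Int × Int) : String :=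
  let n : Int := 1000000
  let mn := [min c1.1 (min c2.1 c3.1), min c1.2.1 (min c2.2.1 c3.2.1),
             min c1.2.2.1 (min c2.2.2.1 c3.2.2.1), min c1.2.2.2 (min c2.2.2.2 c3.2.2.2)]
  let s := mn.sum
  if s < n then "IMPOSSIBLE"
  else if s = n then PySem.Str.join " " (mn.map PySem.Int.toStr)
  else PySem.Str.join " " ((dumbGo mn n).map PySem.Int.toStr)

-- ===== PRECONDITION & SPEC =====
def Spec_dumb (c1 : Int × Int × Int × Int) (c2 : Int × Int × Int × Int) (c3 : Int × Int × Int × Int) (out : String) : Prop := out = dumb_alt c1 c2 c3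
instance (c1 : Int × Int × Int × Int) (c2 : Int × Int × Int × Int) (c3 : Int × Int × Int × Int) (out : String) : Decidable (Spec_dumb c1 c2 c3 out) := by unfold Spec_dumb; infer_instance

-- ===== CLAIM (what is proved, stated in full; the proofs are below) =====
def Claim_equal_dumb : Prop := ∀ (c1 : Int × Int × Int × Int) (c2 : Int × Int × Int × Int) (c3 : Int × Int × Int × Int), Dom_dumb c1 c2 c3 → Spec_dumb c1 c2 c3 (dumb c1 c2 c3)

-- ===== LEMMAS AND PROOFS =====

theorem join_one (a : String) : PySem.Str.join " " [a] = a := by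
  apply String.toList_injective
  simp [PySem.Str.toList_join, PySem.Chars.join_singleton]

theorem join_cons2 (a b : String) (l : List String) :
    PySem.Str.join " " (a :: b :: l) = a ++ " " ++ PySem.Str.join " " (b :: l) := by
  apply String.toList_injective
  simp [PySem.Str.toList_join, PySem.Chars.join_cons_cons]

theorem join_snoc (z : String) : ∀ (xs : List String), xs ≠ [] →
    PySem.Str.join " " (xs ++ [z]) = PySem.Str.join " " xs ++ " " ++ z
  | [], h => absurd rfl h
  | [y], _ => by rw [join_one]; rw [show ([y] ++ [z] : List String) = [y, z] from rfl, join_cons2, join_one]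
  | y :: w :: ys, _ => by
      simp only [List.cons_append]
      rw [join_cons2, join_cons2, ← List.cons_append, join_snoc z (w :: ys) (by simp)]
      simp [String.append_assoc]

theorem sjoin_snoc (l : List String) (z : String) : String.join (l ++ [z]) = String.join l ++ z := by
  simp [String.join]

theorem join_pad (xs : List String) (h : xs ≠ []) (k : Nat) :
    PySem.Str.join " " xs ++ String.join (List.replicate k " 0") = PySem.Str.join " " (xs ++ List.replicate k "0") := by
  induction k with
  | zero => simp [String.join]
  | succ k ih =>
      rw [show List.replicate (k+1) ("0":String) = List.replicate k "0" ++ ["0"] from List.replicate_succ' ..,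
        ← List.append_assoc, join_snoc "0" _ (by simp [h]), ← ih,
        show List.replicate (k+1) (" 0":String) = List.replicate k " 0" ++ [" 0"] from List.replicate_succ' ..,
        sjoin_snoc]
      simp [String.append_assoc]

theorem dumb_eq_alt (c1 c2 c3 : Int × Int × Int × Int) : dumb c1 c2 c3 = dumb_alt c1 c2 c3 := by
  unfold dumb dumb_alt
  generalize min c1.1 (min c2.1 c3.1) = a
  generalize min c1.2.1 (min c2.2.1 c3.2.1) = b
  generalize min c1.2.2.1 (min c2.2.2.1 c3.2.2.1) = c
  generalize min c1.2.2.2 (min c2.2.2.2 c3.2.2.2) = d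
  simp only [List.sum_cons, List.sum_nil, add_zero]
  by_cases h1 : a + b + c + d < 1000000
  · rw [if_pos h1, if_pos (by omega : a + (b + (c + d)) < 1000000)]
  · rw [if_neg h1, if_neg (by omega : ¬ a + (b + (c + d)) < 1000000)]
    by_cases h2 : a + b + c + d = 1000000
    · rw [if_pos h2, if_pos (by omega : a + (b + (c + d)) = 1000000)]
      simp only [List.map_cons, List.map_nil]
      rw [join_cons2, join_cons2, join_cons2, join_one]
      simp [String.append_assoc]
    · rw [if_neg h2, if_neg (by omega : ¬ a + (b + (c + d)) = 1000000)]
      have hz : ("0" : String) = PySem.Int.toStr 0 := by decide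
      by_cases h3 : a < 1000000
      · by_cases h4 : a + b < 1000000
        · by_cases h5 : a + b + c < 1000000
          · -- crossing at the fourth element
            have hw : dumbWhile [a, b, c, d] 0 0 = (4, 0 + a + b + c + d) := by
              rw [dumbWhile, if_pos (by norm_num), dumbWhile, if_pos (by omega),
                dumbWhile, if_pos (by omega), dumbWhile, if_pos (by omega), dumbWhile]
            have hg : dumbGo [a, b, c, d] 1000000
                = [a, b, c, 1000000 - a - b - c] := by
              rw [dumbGo, if_pos (by omega), dumbGo, if_pos (by omega),
                dumbGo, if_pos (by omega), dumbGo, if_neg (by omega)]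
              norm_num [List.replicate]
            rw [hw, hg, if_neg (by dsimp only; omega)]
            simp only [List.take, List.map_cons, List.map_nil, List.cons_append, List.nil_append,
              List.sum_cons, List.sum_nil, add_zero, zero_add, List.length_cons, List.length_nil]
            norm_num [String.join]
            ring_nf
          · -- crossing at the third element
            have hw : dumbWhile [a, b, c, d] 0 0 = (3, 0 + a + b + c) := by
              rw [dumbWhile, if_pos (by norm_num), dumbWhile, if_pos (by omega),
                dumbWhile, if_pos (by omega), dumbWhile, if_neg (by omega)]
            have hg : dumbGo [a, b, c, d] 1000000
                = [a, b, 1000000 - a - b, 0] := by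
              rw [dumbGo, if_pos (by omega), dumbGo, if_pos (by omega),
                dumbGo, if_neg (by omega)]
              norm_num [List.replicate]
            rw [hw, hg]
            by_cases h6 : (0:Int) + a + b + c = 1000000
            · rw [if_pos (by dsimp only; omega)]
              have hc : c = 1000000 - a - b := by omega
              simp only [List.take, List.map_cons, List.map_nil, List.length_cons, List.length_nil]
              simp only [Nat.reduceAdd, Nat.reduceSub]
              rw [join_pad _ (by simp) 1]
              simp [List.replicate, hz, hc]
            · rw [if_neg (by dsimp only; omega)]
              simp only [List.take, List.map_cons, List.map_nil, List.cons_append, List.nil_append,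
                List.sum_cons, List.sum_nil, add_zero, zero_add, List.length_cons, List.length_nil]
              simp only [Nat.reduceAdd, Nat.reduceSub]
              rw [join_pad _ (by simp) 1]
              simp [List.replicate, hz]
              ring_nf
        · -- crossing at the second element
          have hw : dumbWhile [a, b, c, d] 0 0 = (2, 0 + a + b) := by
            rw [dumbWhile, if_pos (by norm_num), dumbWhile, if_pos (by omega), dumbWhile, if_neg (by omega)]
          have hg : dumbGo [a, b, c, d] 1000000 = [a, 1000000 - a, 0, 0] := by
            rw [dumbGo, if_pos (by omega), dumbGo, if_neg (by omega)]
            norm_num [List.replicate]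
          rw [hw, hg]
          by_cases h6 : (0:Int) + a + b = 1000000
          · rw [if_pos (by dsimp only; omega)]
            have hb : b = 1000000 - a := by omega
            simp only [List.take, List.map_cons, List.map_nil, List.length_cons, List.length_nil]
            simp only [Nat.reduceAdd, Nat.reduceSub]
            rw [join_pad _ (by simp) 2]
            simp [List.replicate, hz, hb]
          · rw [if_neg (by dsimp only; omega)]
            simp only [List.take, List.map_cons, List.map_nil, List.cons_append, List.nil_append,
              List.sum_cons, List.sum_nil, add_zero, zero_add, List.length_cons, List.length_nil]
            simp only [Nat.reduceAdd, Nat.reduceSub]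
            rw [join_pad _ (by simp) 2]
            simp [List.replicate, hz]
      · -- crossing at the first element
        have hw : dumbWhile [a, b, c, d] 0 0 = (1, 0 + a) := by
          rw [dumbWhile, if_pos (by norm_num), dumbWhile, if_neg (by omega)]
        have hg : dumbGo [a, b, c, d] 1000000 = [1000000, 0, 0, 0] := by
          rw [dumbGo, if_neg (by omega)]
          norm_num [List.replicate]
        rw [hw, hg]
        by_cases h6 : (0:Int) + a = 1000000
        · rw [if_pos (by dsimp only; omega)]
          have ha : a = 1000000 := by omega
          simp only [List.take, List.map_cons, List.map_nil, List.length_cons, List.length_nil]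
          simp only [Nat.reduceAdd, Nat.reduceSub]
          rw [join_pad _ (by simp) 3]
          simp [List.replicate, hz, ha]
        · rw [if_neg (by dsimp only; omega)]
          simp only [List.take, List.map_cons, List.map_nil, List.nil_append,
            List.sum_nil, zero_add, List.length_cons, List.length_nil]
          simp only [Nat.reduceSub]
          rw [join_pad _ (by simp) 3]
          simp [List.replicate, hz]

-- ===== VERDICT (by name: the statement is the Claim_ definition above) =====
theorem dumb_spec : Claim_equal_dumb := by
  intro c1 c2 c3 _
  exact dumb_eq_alt c1 c2 c3
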